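-- pv_equiv track=rewrite | github.com/dodoburner/ion-flux-relabelling | sol.py | traverseLabels
-- ===== SOURCE A (Python) =====
-- def traverseLabels(array, label, q, prev=-1):
--     if not label:
--         return
--     elif label in q:
--         index = q.index(label)
--         q[index] = prev
--
--     half = len(array) // 2
--     leftHalf = array[:half]
--     rightHalf = array[half:]
--
--     left = leftHalf.pop() if len(leftHalf) > 0 else None
--     right = rightHalf.pop() if len(rightHalf) > 0 else None
--
--     traverseLabels(leftHalf, left, q, label)
--     traverseLabels(rightHalf, right, q, label)
--     return q
-- ===== SOURCE B (Python) =====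
-- def traverseLabels(array, label, q, prev=-1):
--     # Two-phase: an explicit stack walks index ranges (no list slicing),
--     # collecting (label, parent) pairs in A's visit order; then the
--     # replacements are applied to q in that same order.
--     if not label:
--         return None
--     pairs = []
--     stack = [(0, len(array), label, prev)]
--     while stack:
--         lo, hi, lab, pr = stack.pop()
--         if not lab:
--             continue
--         pairs.append((lab, pr))
--         half = (hi - lo) // 2
--         left = array[lo + half - 1] if half > 0 else None
--         right = array[hi - 1] if hi - lo - half > 0 else None
--         stack.append((lo + half, hi - 1, right, lab))
--         stack.append((lo, lo + half - 1, left, lab))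
--     for lab, pr in pairs:
--         if lab in q:
--             q[q.index(lab)] = pr
--     return q
-- ===== Notes on version B (the rewrite author's own statement) =====
-- stated objective: alternative
-- what changed: A's slice-copying recursion (each call copies both halves of the array and mutates q mid-traversal) is replaced by an explicit stack iterating over index ranges into the untouched array, collecting the (label, parent) pairs first and applying the q-replacements in a separate second pass in the same order.
import Mathlib
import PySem

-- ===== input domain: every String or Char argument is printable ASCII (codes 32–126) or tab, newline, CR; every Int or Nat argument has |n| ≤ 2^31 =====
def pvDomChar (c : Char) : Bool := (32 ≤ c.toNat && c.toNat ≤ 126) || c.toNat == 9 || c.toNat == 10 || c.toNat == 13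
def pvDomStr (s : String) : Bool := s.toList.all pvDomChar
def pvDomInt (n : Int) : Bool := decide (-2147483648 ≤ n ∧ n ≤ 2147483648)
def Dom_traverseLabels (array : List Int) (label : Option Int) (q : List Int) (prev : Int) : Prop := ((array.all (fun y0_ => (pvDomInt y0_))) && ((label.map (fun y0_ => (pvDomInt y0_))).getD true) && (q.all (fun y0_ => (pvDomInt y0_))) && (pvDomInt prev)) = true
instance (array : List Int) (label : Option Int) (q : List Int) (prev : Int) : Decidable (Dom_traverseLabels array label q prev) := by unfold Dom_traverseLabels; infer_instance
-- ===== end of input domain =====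

-- B replaces A's slice-copying recursion with an explicit stack over index ranges and
-- applies the q-replacements in a separate second pass (same visit order, same result);
-- equivalence is about the final content of q (both Pythons mutate q identically in place).

-- ===== PORT A =====

-- Python's `if label in q: q[q.index(label)] = prev`: replace the first occurrence, no-op if absent.
def setFirst (q : List Int) (l : Int) (pr : Int) : List Int :=
  match q with
  | [] => []
  | x :: xs => if x = l then pr :: xs else x :: setFirst xs l pr

-- State-passing transliteration of A's recursion: the returned list is the content of the
-- (in Python: in-place mutated) list q after the call.  The fuel argument is only a
-- structural-termination guard; traverseLabels passes more than the recursion depth,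
-- so the 0-case is never reached.
def goA : Nat → List Int → Option Int → List Int → Int → List Int
  | 0, _, _, q, _ => q            -- fuel guard only (unreachable with enough fuel)
  | fuel + 1, array, label, q, prev =>
    match label with
    | none => q                   -- `if not label: return`
    | some l =>
      if l = 0 then q             -- 0 is falsy in Python
      else
        let q1 := setFirst q l prev
        let half := array.length / 2
        let leftHalf := array.take half          -- array[:half]
        let rightHalf := array.drop half         -- array[half:]
        -- `.pop()` yields the last element, leaving dropLast; on [] Python keeps None and []
        let q2 := goA fuel leftHalf.dropLast leftHalf.getLast? q1 l
        goA fuel rightHalf.dropLast rightHalf.getLast? q2 l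

def traverseLabels (array : List Int) (label : Option Int) (q : List Int) (prev : Int) : Option (List Int) :=
  match label with
  | none => none                  -- bare `return` → None
  | some l => if l = 0 then none else some (goA (2 * array.length + 2) array label q prev)

-- ===== PORT B =====

-- Source B's while-loop: pop a range, record its (label, parent) pair, push the two child ranges.
-- The array accesses are Source B's `array[lo+half-1]` / `array[hi-1]` (pyGetD: in range on every
-- stack reachable from the root range, so the default is never used there).  The fuel argument
-- is only a structural-termination guard; traverseLabels_alt passes more than the number of
-- loop iterations, so the 0-case is never reached.
def loopB (array : List Int) : Nat → List (Int × Int × Option Int × Int)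
    → List (Int × Int) → List (Int × Int)
  | 0, _, pairs => pairs          -- fuel guard only (unreachable with enough fuel)
  | fuel + 1, stack, pairs =>
    match stack with
    | [] => pairs
    | (lo, hi, lab, pr) :: rest =>
      match lab with
      | none => loopB array fuel rest pairs               -- `if not lab: continue`
      | some l =>
        if l = 0 then loopB array fuel rest pairs         -- 0 is falsy
        else
          let pairs' := pairs ++ [(l, pr)]
          let half := PySem.Int.floordiv (hi - lo) 2
          let left := if half > 0 then some (PySem.List.pyGetD array (lo + half - 1) 0) else none
          let right := if hi - lo - half > 0 then some (PySem.List.pyGetD array (hi - 1) 0) else none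
          -- push right child then left child; cons-order below pops the left one first
          loopB array fuel ((lo, lo + half - 1, left, l) :: (lo + half, hi - 1, right, l) :: rest) pairs'

def traverseLabels_alt (array : List Int) (label : Option Int) (q : List Int) (prev : Int) :
    Option (List Int) :=
  match label with
  | none => none
  | some l =>
    if l = 0 then none
    else
      let pairs := loopB array (3 * array.length + 5) [((0 : Int), (array.length : Int), some l, prev)] []
      -- second pass: `for lab, pr in pairs: if lab in q: q[q.index(lab)] = pr`
      some (pairs.foldl (fun qq p => setFirst qq p.1 p.2) q)

-- ===== PRECONDITION & SPEC =====
def Spec_traverseLabels (array : List Int) (label : Option Int) (q : List Int) (prev : Int) (out : Option (List Int)) : Prop := out = traverseLabels_alt array label q prev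
instance (array : List Int) (label : Option Int) (q : List Int) (prev : Int) (out : Option (List Int)) : Decidable (Spec_traverseLabels array label q prev out) := by unfold Spec_traverseLabels; infer_instance

-- ===== CLAIM (what is proved, stated in full; the proofs are below) =====
def Claim_equal_traverseLabels : Prop := ∀ (array : List Int) (label : Option Int) (q : List Int) (prev : Int), Dom_traverseLabels array label q prev → Spec_traverseLabels array label q prev (traverseLabels array label q prev)

-- ===== LEMMAS AND PROOFS =====

-- 0 for a falsy label (None), 1 otherwise: termination/fuel measure helper.
def pyRank (lab : Option Int) : Nat :=
  match lab with
  | none => 0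
  | some _ => 1

theorem pyRank_le (lab : Option Int) : pyRank lab ≤ 1 := by
  cases lab <;> simp [pyRank]

theorem dec_left (arr : List Int) (l : Int) :
    2 * ((arr.take (arr.length / 2)).dropLast).length
      + pyRank ((arr.take (arr.length / 2)).getLast?) < 2 * arr.length + pyRank (some l) := by
  cases arr with
  | nil => simp [pyRank]
  | cons a as =>
    have h1 := pyRank_le (((a :: as).take ((a :: as).length / 2)).getLast?)
    simp only [pyRank, List.length_dropLast, List.length_take, List.length_cons] at h1 ⊢
    omega

theorem dec_right (arr : List Int) (l : Int) :
    2 * ((arr.drop (arr.length / 2)).dropLast).length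
      + pyRank ((arr.drop (arr.length / 2)).getLast?) < 2 * arr.length + pyRank (some l) := by
  cases arr with
  | nil => simp [pyRank]
  | cons a as =>
    have h1 := pyRank_le (((a :: as).drop ((a :: as).length / 2)).getLast?)
    simp only [pyRank, List.length_dropLast, List.length_drop, List.length_cons] at h1 ⊢
    omega

-- Fuel measure for one loopB stack entry.
def entryCost (e : Int × Int × Option Int × Int) : Nat :=
  match e.2.2.1 with
  | none => 1
  | some _ => 3 * (e.2.1 - e.1).toNat + 4

theorem one_le_entryCost (e : Int × Int × Option Int × Int) : 1 ≤ entryCost e := by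
  unfold entryCost; cases e.2.2.1 <;> simp

-- The (label, parent) pairs of the traversal, in visit order (pre-order, left first):
-- the common specification both ports are reduced to.
def pairsOf (arr : List Int) (lab : Option Int) (pr : Int) : List (Int × Int) :=
  match lab with
  | none => []
  | some l =>
    if l = 0 then []
    else
      let half := arr.length / 2
      let lh := arr.take half
      let rh := arr.drop half
      (l, pr) :: (pairsOf lh.dropLast lh.getLast? l ++ pairsOf rh.dropLast rh.getLast? l)
termination_by 2 * arr.length + pyRank lab
decreasing_by
  all_goals first
    | exact dec_left arr l
    | exact dec_right arr l

-- A's recursion applies exactly the pairs of `pairsOf`, in order, to q (given enough fuel).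
theorem goA_eq (fuel : Nat) (arr : List Int) (lab : Option Int) (q : List Int) (pr : Int)
    (hf : 2 * arr.length + pyRank lab < fuel) :
    goA fuel arr lab q pr = (pairsOf arr lab pr).foldl (fun qq p => setFirst qq p.1 p.2) q := by
  induction fuel generalizing arr lab q pr with
  | zero => omega
  | succ f ih =>
    cases lab with
    | none => simp [goA, pairsOf]
    | some l =>
      by_cases h : l = 0
      · rw [goA, pairsOf]; simp [h]
      · have hfl : 2 * ((arr.take (arr.length / 2)).dropLast).length
            + pyRank ((arr.take (arr.length / 2)).getLast?) < f := by
          have := dec_left arr l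
          simp only [pyRank] at *
          omega
        have hfr : 2 * ((arr.drop (arr.length / 2)).dropLast).length
            + pyRank ((arr.drop (arr.length / 2)).getLast?) < f := by
          have := dec_right arr l
          simp only [pyRank] at *
          omega
        rw [goA, pairsOf]
        simp only [h, ite_false]
        rw [ih _ _ _ _ hfl, ih _ _ _ _ hfr]
        simp [List.foldl_append]

-- getLast? and dropLast of a window (drop i).take k of a list, as array reads.
theorem getLast?_window (a : List Int) (i k : Nat) (h : i + k ≤ a.length) :
    ((a.drop i).take k).getLast? = if k = 0 then none else some (a.getD (i + k - 1) 0) := by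
  rcases Nat.eq_zero_or_pos k with hk | hk
  · subst hk; simp
  · have hne : k ≠ 0 := by omega
    simp only [hne, if_false]
    rw [List.getLast?_eq_getElem?]
    have hlen : ((a.drop i).take k).length = k := by
      simp [List.length_take, List.length_drop]; omega
    rw [hlen, List.getElem?_take]
    simp only [List.getElem?_drop]
    have hlt : k - 1 < k := by omega
    simp only [hlt, if_true]
    have hb : i + (k - 1) < a.length := by omega
    rw [List.getElem?_eq_getElem hb, List.getD_eq_getElem?_getD]
    have hb2 : i + k - 1 < a.length := by omega
    rw [List.getElem?_eq_getElem hb2]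
    simp
    congr 1
    omega

theorem dropLast_window (a : List Int) (i k : Nat) (h : i + k ≤ a.length) :
    ((a.drop i).take k).dropLast = (a.drop i).take (k - 1) := by
  rw [List.dropLast_eq_take, List.take_take]
  congr 1
  simp [List.length_take, List.length_drop]
  omega

-- Live stack entries stay in bounds; loopB appends, to pairs, the pairsOf of every
-- stacked slice in order (given enough fuel).
theorem loopB_eq (array : List Int) (fuel : Nat) (stack : List (Int × Int × Option Int × Int))
    (pairs : List (Int × Int))
    (hfuel : (stack.map entryCost).sum ≤ fuel)
    (hinv : ∀ e ∈ stack, e.2.2.1 ≠ none → 0 ≤ e.1 ∧ e.1 ≤ e.2.1 ∧ e.2.1 ≤ (array.length : Int)) :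
    loopB array fuel stack pairs
      = pairs ++ stack.flatMap
          (fun e => pairsOf ((array.drop e.1.toNat).take (e.2.1 - e.1).toNat) e.2.2.1 e.2.2.2) := by
  induction fuel generalizing stack pairs with
  | zero =>
    rcases stack with _ | ⟨e, rest⟩
    · simp [loopB]
    · exfalso
      simp only [List.map_cons, List.sum_cons] at hfuel
      have := one_le_entryCost e
      omega
  | succ f ih =>
    rcases stack with _ | ⟨⟨lo, hi, lab, pr⟩, rest⟩
    · simp [loopB]
    · have hrest := fun e he => hinv e (List.mem_cons_of_mem _ he)
      simp only [List.map_cons, List.sum_cons] at hfuel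
      cases lab with
      | none =>
        rw [loopB, ih rest pairs (by have := one_le_entryCost (lo, hi, none, pr); omega) hrest]
        simp [pairsOf]
      | some l =>
        by_cases hl : l = 0
        · subst hl
          rw [loopB]
          rw [ih rest pairs (by have := one_le_entryCost (lo, hi, some 0, pr); omega) hrest]
          simp [pairsOf]
        · have hb := hinv (lo, hi, some l, pr) (by simp) (by simp)
          have h0 : 0 ≤ lo := hb.1
          have hlh : lo ≤ hi := hb.2.1
          have hhL : hi ≤ (array.length : Int) := hb.2.2
          have hm : hi - lo = (((hi - lo).toNat : Nat) : Int) := by omega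
          have hhalf : PySem.Int.floordiv (hi - lo) 2 = (((hi - lo).toNat / 2 : Nat) : Int) := by
            rw [PySem.Int.floordiv_eq_ediv_of_pos (by omega : (0:Int) < 2)]
            omega
          rw [loopB]
          simp only [if_neg hl, hhalf]
          have hdiv := Nat.div_le_self (hi - lo).toNat 2
          have him : lo.toNat + (hi - lo).toNat ≤ array.length := by omega
          rw [ih _ _ ?hfuel2 ?hnew]
          case hfuel2 =>
            simp only [List.map_cons, List.sum_cons]
            simp only [entryCost] at hfuel
            split_ifs <;> simp only [entryCost] <;> omega
          case hnew =>
            intro e he hne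
            simp only [List.mem_cons] at he
            rcases he with he | he | he
            · subst he
              by_cases hc : (((((hi - lo).toNat / 2 : Nat)) : Int) > 0)
              · refine ⟨?_, ?_, ?_⟩ <;> dsimp only <;> omega
              · simp only [if_neg hc] at hne
                simp at hne
            · subst he
              by_cases hc : (hi - lo - (((hi - lo).toNat / 2 : Nat) : Int) > 0)
              · refine ⟨?_, ?_, ?_⟩ <;> dsimp only <;> omega
              · simp only [if_neg hc] at hne
                simp at hne
            · exact hrest e he hne
          simp only [List.flatMap_cons, List.append_assoc]
          -- normalise the two pushed entries to window form
          have hA1 : List.take ((lo + (((hi - lo).toNat / 2 : Nat) : Int) - 1 - lo).toNat) (List.drop lo.toNat array)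
              = List.take ((hi - lo).toNat / 2 - 1) (List.drop lo.toNat array) := by
            congr 1; omega
          have hA2 : (if (((((hi - lo).toNat / 2 : Nat)) : Int) > 0)
                then some (PySem.List.pyGetD array (lo + (((hi - lo).toNat / 2 : Nat) : Int) - 1) 0) else none)
              = (if (hi - lo).toNat / 2 = 0 then none
                 else some (array.getD (lo.toNat + (hi - lo).toNat / 2 - 1) 0)) := by
            by_cases hk0 : (hi - lo).toNat / 2 = 0
            · simp [hk0]
            · have hcast : lo + (((hi - lo).toNat / 2 : Nat) : Int) - 1
                  = ((lo.toNat + (hi - lo).toNat / 2 - 1 : Nat) : Int) := by omega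
              rw [if_pos (by omega), if_neg hk0, hcast, PySem.List.pyGetD_natCast]
          have hA3 : List.take ((hi - 1 - (lo + (((hi - lo).toNat / 2 : Nat) : Int))).toNat)
                (List.drop (lo + (((hi - lo).toNat / 2 : Nat) : Int)).toNat array)
              = List.take ((hi - lo).toNat - (hi - lo).toNat / 2 - 1)
                (List.drop (lo.toNat + (hi - lo).toNat / 2) array) := by
            have e1 : (hi - 1 - (lo + (((hi - lo).toNat / 2 : Nat) : Int))).toNat
                = (hi - lo).toNat - (hi - lo).toNat / 2 - 1 := by omega
            have e2 : (lo + (((hi - lo).toNat / 2 : Nat) : Int)).toNat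
                = lo.toNat + (hi - lo).toNat / 2 := by omega
            rw [e1, e2]
          have hA4 : (if hi - lo - (((hi - lo).toNat / 2 : Nat) : Int) > 0
                then some (PySem.List.pyGetD array (hi - 1) 0) else none)
              = (if (hi - lo).toNat - (hi - lo).toNat / 2 = 0 then none
                 else some (array.getD (lo.toNat + (hi - lo).toNat - 1) 0)) := by
            by_cases hk0 : (hi - lo).toNat - (hi - lo).toNat / 2 = 0
            · rw [if_neg (by omega), if_pos hk0]
            · have hcast : hi - 1 = ((lo.toNat + (hi - lo).toNat - 1 : Nat) : Int) := by omega
              rw [if_pos (by omega), if_neg hk0, hcast, PySem.List.pyGetD_natCast]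
          rw [hA1, hA2, hA3, hA4]
          -- unfold the head pairsOf on the right and bring it to the same window form
          conv_rhs => rw [pairsOf]
          simp only [if_neg hl]
          have hslen : (List.take (hi - lo).toNat (List.drop lo.toNat array)).length = (hi - lo).toNat := by
            simp [List.length_take, List.length_drop]; omega
          have hLH : (List.take (hi - lo).toNat (List.drop lo.toNat array)).take
                ((List.take (hi - lo).toNat (List.drop lo.toNat array)).length / 2)
              = List.take ((hi - lo).toNat / 2) (List.drop lo.toNat array) := by
            rw [hslen, List.take_take]
            congr 1; omega
          have hRH : (List.take (hi - lo).toNat (List.drop lo.toNat array)).drop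
                ((List.take (hi - lo).toNat (List.drop lo.toNat array)).length / 2)
              = List.take ((hi - lo).toNat - (hi - lo).toNat / 2)
                (List.drop (lo.toNat + (hi - lo).toNat / 2) array) := by
            rw [hslen, List.drop_take, List.drop_drop]
          rw [hLH, hRH,
            dropLast_window array lo.toNat ((hi - lo).toNat / 2) (by omega),
            getLast?_window array lo.toNat ((hi - lo).toNat / 2) (by omega),
            dropLast_window array (lo.toNat + (hi - lo).toNat / 2) ((hi - lo).toNat - (hi - lo).toNat / 2) (by omega),
            getLast?_window array (lo.toNat + (hi - lo).toNat / 2) ((hi - lo).toNat - (hi - lo).toNat / 2) (by omega)]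
          have hidx : lo.toNat + (hi - lo).toNat / 2 + ((hi - lo).toNat - (hi - lo).toNat / 2) - 1
              = lo.toNat + (hi - lo).toNat - 1 := by omega
          rw [hidx]
          simp [List.append_assoc]


-- ===== VERDICT (by name: the statement is the Claim_ definition above) =====
theorem traverseLabels_spec : Claim_equal_traverseLabels := by
  intro array label q prev _
  unfold Spec_traverseLabels
  cases label with
  | none => rw [traverseLabels, traverseLabels_alt]
  | some l =>
    by_cases h : l = 0
    · rw [traverseLabels, traverseLabels_alt]; simp [h]
    · rw [traverseLabels, traverseLabels_alt]
      simp only [h, ite_false]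
      rw [loopB_eq array (3 * array.length + 5) _ _ ?hfu ?hin,
        goA_eq (2 * array.length + 2) array (some l) q prev ?hg]
      case hg => simp only [pyRank]; omega
      case hfu => simp only [List.map_cons, List.map_nil, List.sum_cons, List.sum_nil, entryCost]; omega
      case hin =>
        intro e he hne
        simp at he
        subst he
        simp
      simp
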